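-- pv_equiv track=rewrite | github.com/Marigleta/Simplon | Brief SimplonSearch-Copy1.py | almost
-- ===== SOURCE A (Python) =====
-- def almost(mot, s):
--     occurrences = []
--     mots = s.split()
--     combinaisons = comb(mot)
--     for i in mots:
--         #mot trouvé:
--         if i in combinaisons:
--             occurrences.append(i)
--     return occurrences
--
-- def comb(mot):
--     combinaisons = []
--     for i in range(len(mot)):
--         combinaisons.append(mot[:i]+mot[i+1:])
--     return combinaisons
-- ===== SOURCE B (Python) =====
-- def almost(mot, s):
--     occurrences = []
--     n = len(mot)
--     for w in s.split():
--         if len(w) == n - 1 and _one_deletion(w, mot):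
--             occurrences.append(w)
--     return occurrences
--
-- def _one_deletion(w, mot):
--     # w has length len(mot)-1: scan in parallel to the first mismatch,
--     # skip that one character of mot, and compare the suffixes.
--     i = 0
--     while i < len(w) and w[i] == mot[i]:
--         i += 1
--     return w[i:] == mot[i + 1:]
-- ===== Notes on version B (the rewrite author's own statement) =====
-- stated objective: alternative
-- what changed: Instead of generating the list of all one-deletion candidates of mot and testing each word by linear membership in that list, B checks each word directly with a two-pointer scan (equal length to len(mot)-1, common prefix up to first mismatch, then suffix equality after skipping one char of mot).
import Mathlib
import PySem

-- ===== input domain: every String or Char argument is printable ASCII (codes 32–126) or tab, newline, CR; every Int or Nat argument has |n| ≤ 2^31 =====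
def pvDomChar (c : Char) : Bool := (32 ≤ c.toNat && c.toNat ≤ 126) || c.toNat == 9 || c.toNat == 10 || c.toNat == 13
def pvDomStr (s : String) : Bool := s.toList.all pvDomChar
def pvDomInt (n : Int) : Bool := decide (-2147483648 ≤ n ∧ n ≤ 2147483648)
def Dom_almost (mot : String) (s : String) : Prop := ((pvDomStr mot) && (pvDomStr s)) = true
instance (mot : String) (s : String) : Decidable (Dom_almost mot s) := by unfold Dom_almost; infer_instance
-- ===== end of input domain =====

-- B replaces A's "generate all one-deletion candidates of mot, then test membership per word"
-- by a direct per-word two-pointer check of the one-deletion relation (objective: alternative/simpler).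

-- ===== PORT A =====
-- comb(mot): list of mot with the i-th character deleted, for each i
def comb (mot : String) : List String :=
  (PySem.List.pyRange 0 (mot.toList.length : Int)).foldl
    (fun acc i =>
      acc ++ [String.ofList (PySem.List.slice mot.toList none (some i) ++
                             PySem.List.slice mot.toList (some (i + 1)) none)]) []

def almost (mot : String) (s : String) : List String :=
  let combinaisons := comb mot
  (PySem.Str.split₀ s).foldl
    (fun occurrences i =>
      if combinaisons.contains i then occurrences ++ [i] else occurrences) []

-- ===== PORT B =====
-- the while loop of _one_deletion: scan to the first mismatch, then w[i:] == mot[i+1:]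
def oneDeletion : List Char → List Char → Bool
  | [], m => decide (([] : List Char) = m.drop 1)          -- i = len(w): '' == mot[i+1:]
  | _ :: _, [] => false                                     -- unreachable under the length guard
  | a :: ws, b :: ms => if a = b then oneDeletion ws ms else decide (a :: ws = ms)

def almost_alt (mot : String) (s : String) : List String :=
  (PySem.Str.split₀ s).foldl
    (fun occurrences w =>
      if (w.toList.length : Int) = (mot.toList.length : Int) - 1
          && oneDeletion w.toList mot.toList
      then occurrences ++ [w] else occurrences) []

-- ===== PRECONDITION & SPEC =====
def Spec_almost (mot : String) (s : String) (out : List String) : Prop := out = almost_alt mot s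
instance (mot : String) (s : String) (out : List String) : Decidable (Spec_almost mot s out) := by unfold Spec_almost; infer_instance

-- ===== CLAIM (what is proved, stated in full; the proofs are below) =====
def Claim_equal_almost : Prop := ∀ (mot : String) (s : String), Dom_almost mot s → Spec_almost mot s (almost mot s)

-- ===== LEMMAS AND PROOFS =====

-- list-level view of comb
def delList (m : List Char) : List (List Char) :=
  (List.range m.length).map (fun i => m.take i ++ m.drop (i + 1))

theorem comb_eq (mot : String) : comb mot = (delList mot.toList).map String.ofList := by
  unfold comb delList
  rw [PySem.List.pyRange_zero_natCast]
  rw [PySem.List.foldl_append_singleton_eq_map]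
  simp only [List.nil_append, List.map_map]
  refine List.map_congr_left (fun k hk => ?_)
  simp [Function.comp, PySem.List.slice_to_natCast]
  rw [show ((k : Int) + 1) = ((k + 1 : Nat) : Int) by push_cast; ring,
      PySem.List.slice_from_natCast]

theorem delList_cons (b : Char) (ms : List Char) :
    delList (b :: ms) = ms :: (delList ms).map (b :: .) := by
  unfold delList
  rw [show (b :: ms).length = ms.length + 1 from rfl, List.range_succ_eq_map]
  simp [List.map_map, Function.comp]

theorem oneDeletion_self (w : List Char) (c : Char) : oneDeletion w (c :: w) = true := by
  induction w generalizing c with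
  | nil => simp [oneDeletion]
  | cons x t ih =>
    by_cases h : x = c
    · simpa [oneDeletion, h] using ih x
    · simp [oneDeletion, h]

theorem mem_delList_iff (w m : List Char) :
    w ∈ delList m ↔ (w.length + 1 = m.length ∧ oneDeletion w m = true) := by
  induction m generalizing w with
  | nil => simp [delList]
  | cons b ms ih =>
    rw [delList_cons]
    cases w with
    | nil =>
      simp only [List.mem_cons, List.mem_map]
      constructor
      · rintro (h | ⟨x, _, h⟩)
        · subst h; simp [oneDeletion]
        · exact absurd h (by simp)
      · rintro ⟨hl, _⟩
        left
        cases ms with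
        | nil => rfl
        | cons c cs => simp at hl
    | cons a ws =>
      simp only [List.mem_cons, List.mem_map]
      by_cases hab : a = b
      · subst hab
        constructor
        · rintro (h | ⟨x, hx, h⟩)
          · -- a :: ws = ms : deleting the head of ms gives ws
            refine ⟨by simp [← h], ?_⟩
            simpa [oneDeletion, ← h] using oneDeletion_self ws a
          · obtain ⟨-, rfl⟩ := List.cons_eq_cons.mp h
            obtain ⟨hl, ho⟩ := (ih x).mp hx
            exact ⟨by simpa using hl, by simpa [oneDeletion] using ho⟩
        · rintro ⟨hl, ho⟩
          right
          exact ⟨ws, (ih ws).mpr ⟨by simpa using hl, by simpa [oneDeletion] using ho⟩, rfl⟩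
      · constructor
        · rintro (h | ⟨x, _, h⟩)
          · exact ⟨by simp [← h], by simp [oneDeletion, hab, ← h]⟩
          · exact absurd h (by simp [Ne.symm hab])
        · rintro ⟨-, ho⟩
          left
          simp only [oneDeletion, if_neg hab, decide_eq_true_eq] at ho
          exact ho

theorem contains_comb_iff (mot : String) (w : String) :
    (comb mot).contains w
      = ((w.toList.length : Int) = (mot.toList.length : Int) - 1
          && oneDeletion w.toList mot.toList) := by
  rw [comb_eq, Bool.eq_iff_iff]
  simp only [List.contains_eq_mem, decide_eq_true_eq, Bool.and_eq_true]
  constructor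
  · intro h
    obtain ⟨x, hx, rfl⟩ := List.mem_map.mp h
    have hx' : (String.ofList x).toList ∈ delList mot.toList := by simpa using hx
    obtain ⟨hl, ho⟩ := (mem_delList_iff _ _).mp hx'
    exact ⟨by omega, ho⟩
  · rintro ⟨hl, ho⟩
    have hl' : w.toList.length + 1 = mot.toList.length := by omega
    exact List.mem_map.mpr
      ⟨w.toList, (mem_delList_iff _ _).mpr ⟨hl', ho⟩, by apply String.ext; simp⟩

-- ===== VERDICT (by name: the statement is the Claim_ definition above) =====
theorem almost_spec : Claim_equal_almost := by
  intro mot s _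
  unfold Spec_almost almost almost_alt
  simp only [contains_comb_iff mot]
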